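-- pv_equiv track=rewrite | github.com/pengw00/nlphw2 | extract_CNF_unit.py | sub_r
-- ===== SOURCE A (Python) =====
-- def sub_r(sub_rule, list_rule):
--     sub = sub_rule.split('_')
--     if len(sub) == 2:
--         sub_rule += ' '
--         sub_rule += '->'
--         for item in sub:
--             sub_rule += ' '
--             sub_rule += item
--         list_rule.append(sub_rule)
--     else:
--         sub_rule += ' '
--         sub_rule += '->'
--         sub_rule += ' '
--         sub_rule += sub[0]
--         for item in sub[2:]:
--             sub[1] += '_'
--             sub[1] += item
--         sub_rule += ' '
--         sub_rule += sub[1]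
--         sub_r(sub[1],list_rule)
--         list_rule.append(sub_rule)
--     l = []
--     for i in range(len(list_rule)):
--         l.append(list_rule[len(list_rule)-i-1])
--     return l
-- ===== SOURCE B (Python) =====
-- def sub_r(sub_rule, list_rule):
--     rules = []
--     name = sub_rule
--     while True:
--         head, tail = name.split('_', 1)
--         rules.append(name + ' -> ' + head + ' ' + tail)
--         if '_' not in tail:
--             break
--         name = tail
--     list_rule.extend(reversed(rules))
--     return list_rule[::-1]
-- ===== Notes on version B (the rewrite author's own statement) =====
-- stated objective: simpler
-- what changed: Replaces A's recursion on the full split with re-joined tail names (and a per-call manual reversal pass) by a short iterative loop that peels one head_tail partition per iteration with split('_', 1), collects the rules, extends list_rule once and reverses once; Pre_ excludes names without '_', on which A raises IndexError (B's tuple unpack of the 1-element split raises ValueError there).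
import Mathlib
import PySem

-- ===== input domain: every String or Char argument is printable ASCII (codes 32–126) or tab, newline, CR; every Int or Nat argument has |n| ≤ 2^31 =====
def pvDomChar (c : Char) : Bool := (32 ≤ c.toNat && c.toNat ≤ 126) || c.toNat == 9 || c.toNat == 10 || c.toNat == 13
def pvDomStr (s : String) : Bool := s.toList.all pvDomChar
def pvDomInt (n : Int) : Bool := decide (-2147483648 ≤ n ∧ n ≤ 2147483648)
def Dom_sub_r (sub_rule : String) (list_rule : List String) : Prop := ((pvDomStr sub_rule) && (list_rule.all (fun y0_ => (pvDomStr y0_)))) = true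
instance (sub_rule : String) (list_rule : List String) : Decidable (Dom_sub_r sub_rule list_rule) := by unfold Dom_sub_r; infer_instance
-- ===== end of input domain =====

-- B replaces A's recursion-plus-repeated-reversal by one pass over the split parts (a
-- different decomposition; no speed claim). Both Pythons mutate list_rule by appending
-- the same produced rules in the same order; the theorems below are about the return value.

-- ===== PORT A =====
-- A's recursion, modelled with a fuel guard (totality only: A recurses on the tail rule
-- name, one part shorter each time, and the fuel passed by sub_r below always suffices
-- inside Pre_). Python strings are carried as List Char (PySem.Chars); sub_r_go returns
-- list_rule after the appends A performs on it, and sub_r does A's final reversal loop.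
def sub_r_go : Nat → List Char → List (List Char) → List (List Char)
  | fuel, sub_rule, list_rule =>
    let sub := PySem.Chars.splitOn sub_rule ['_']
    if sub.length = 2 then
      list_rule ++ [sub.foldl (fun acc item => acc ++ ' ' :: item) (sub_rule ++ [' ', '-', '>'])]
    else
      match fuel, sub with
      | fuel' + 1, s0 :: s1 :: tail =>
        let s1' := tail.foldl (fun acc item => acc ++ '_' :: item) s1
        let rule := sub_rule ++ [' ', '-', '>', ' '] ++ s0 ++ ' ' :: s1'
        sub_r_go fuel' s1' list_rule ++ [rule]
      | _, _ => list_rule  -- Python raises IndexError on sub[1] here (no '_'): outside Pre_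

def sub_r (sub_rule : String) (list_rule : List String) : List String :=
  let lr := sub_r_go (PySem.Chars.splitOn sub_rule.toList ['_']).length sub_rule.toList
      (list_rule.map String.toList)
  ((PySem.List.pyRange 0 (lr.length : Int)).foldl
    (fun l i => l ++ [PySem.List.pyGetD lr ((lr.length : Int) - i - 1) []]) []).map String.mk

-- ===== PORT B =====
-- B's while-True loop peeling one 'head_tail' split per iteration, as structural
-- recursion with fuel (totality only: tail is a strict suffix of name, and the fuel
-- passed by sub_r_alt always suffices). name.split('_', 1) is PySem.Chars.splitOnMax;
-- Python raises ValueError unpacking a 1-element split (name without '_'), so the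
-- catch-all branch is never reached inside Pre_.
def sub_r_alt_go : Nat → List Char → List (List Char) → List (List Char)
  | 0, _, rules => rules
  | f + 1, name, rules =>
    match PySem.Chars.splitOnMax name ['_'] 1 with
    | [head, tail] =>
      let rules' := rules ++ [name ++ [' ', '-', '>', ' '] ++ head ++ ' ' :: tail]
      if PySem.Chars.isIn ['_'] tail then sub_r_alt_go f tail rules' else rules'
    | _ => rules  -- unpack of a 1-element split: Python raises ValueError, outside Pre_

def sub_r_alt (sub_rule : String) (list_rule : List String) : List String :=
  let rules := sub_r_alt_go (sub_rule.toList.length + 1) sub_rule.toList []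
  let lr := list_rule.map String.toList ++ rules.reverse
  ((PySem.List.slice? lr none none (-1)).getD []).map String.mk

-- ===== PRECONDITION & SPEC =====
-- Pre_ excludes exactly the inputs on which A raises IndexError: rule names without '_'
-- (their split has a single part and A's else-branch reads sub[1]).
def Pre_sub_r (sub_rule : String) (list_rule : List String) : Prop :=
  PySem.Str.isIn "_" sub_rule = true
instance (sub_rule : String) (list_rule : List String) : Decidable (Pre_sub_r sub_rule list_rule) := by
  unfold Pre_sub_r; infer_instance

def pvWitness_sub_r : String × List String := ("A_B_C", ["S -> A_B_C"])

def Spec_sub_r (sub_rule : String) (list_rule : List String) (out : List String) : Prop :=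
  out = sub_r_alt sub_rule list_rule
instance (sub_rule : String) (list_rule : List String) (out : List String) : Decidable (Spec_sub_r sub_rule list_rule out) := by
  unfold Spec_sub_r; infer_instance

-- ===== CLAIM (what is proved, stated in full; the proofs are below) =====
def Claim_equal_sub_r : Prop := ∀ (sub_rule : String) (list_rule : List String), Dom_sub_r sub_rule list_rule → Pre_sub_r sub_rule list_rule → Spec_sub_r sub_rule list_rule (sub_r sub_rule list_rule)


-- ===== LEMMAS AND PROOFS =====

-- a plain structural model of Python's str.split('_') (single-character separator)
def mySplit (c : Char) (pre : List Char) : List Char → List (List Char)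
  | [] => [pre]
  | x :: rest => if x = c then pre :: mySplit c [] rest else mySplit c (pre ++ [x]) rest

-- the unit rule emitted for suffix position j, and the list of all of them (deepest first)
def ruleOf (parts : List (List Char)) (j : Nat) : List Char :=
  PySem.Chars.join ['_'] (parts.drop j) ++ [' ', '-', '>', ' '] ++
    parts.getD j [] ++ ' ' :: PySem.Chars.join ['_'] (parts.drop (j + 1))

def rulesOf (parts : List (List Char)) : List (List Char) :=
  ((List.range (parts.length - 1)).map (ruleOf parts)).reverse

theorem go_eq_mySplit (c : Char) (l : List Char) (fuel : Nat) (cur : List Char)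
    (acc : List (List Char)) (h : l.length < fuel) :
    PySem.Chars.splitOn.go [c] fuel l cur acc = acc.reverse ++ mySplit c cur.reverse l := by
  induction l generalizing fuel cur acc with
  | nil =>
    cases fuel with
    | zero => omega
    | succ f => simp [PySem.Chars.splitOn.go, mySplit]
  | cons x rest ih =>
    cases fuel with
    | zero => omega
    | succ f =>
      rw [PySem.Chars.splitOn.go]
      by_cases hx : c = x
      · subst hx
        simp only [List.isPrefixOf, List.isPrefixOf_nil_left, Bool.and_true, beq_self_eq_true,
          if_pos, List.length_cons, List.length_nil, List.drop_succ_cons, List.drop_zero,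
          mySplit, if_pos rfl]
        rw [ih f [] (cur.reverse :: acc) (by simp at h; omega)]
        simp [mySplit]
      · have hbx : (c == x) = false := by simp [hx]
        simp only [List.isPrefixOf, List.isPrefixOf_nil_left, Bool.and_true, hbx,
          Bool.false_eq_true, if_false, mySplit, if_neg (fun h' : x = c => hx h'.symm)]
        rw [ih f (x :: cur) acc (by simp at h; omega)]
        simp

theorem splitOn_eq_mySplit (c : Char) (s : List Char) :
    PySem.Chars.splitOn s [c] = mySplit c [] s := by
  have := go_eq_mySplit c s (s.length + 1) [] [] (by omega)
  simpa [PySem.Chars.splitOn] using this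

theorem mySplit_ne_nil (c : Char) (pre l) : mySplit c pre l ≠ [] := by
  induction l generalizing pre with
  | nil => simp [mySplit]
  | cons x rest ih => by_cases hx : x = c <;> simp [mySplit, hx, ih]

theorem not_mem_of_mem_mySplit (c : Char) (pre l p) (hp : p ∈ mySplit c pre l)
    (hpre : c ∉ pre) : c ∉ p := by
  induction l generalizing pre p with
  | nil => simp [mySplit] at hp; simpa [hp]
  | cons x rest ih =>
    by_cases hx : x = c
    · simp [mySplit, hx] at hp
      rcases hp with hp | hp
      · simpa [hp]
      · exact ih [] p hp (by simp)
    · simp [mySplit, hx] at hp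
      exact ih (pre ++ [x]) p hp (by simp [hpre, Ne.symm hx])

theorem join_mySplit (c : Char) (pre l) :
    PySem.Chars.join [c] (mySplit c pre l) = pre ++ l := by
  induction l generalizing pre with
  | nil => simp [mySplit, PySem.Chars.join, List.intercalate]
  | cons x rest ih =>
    by_cases hx : x = c
    · subst hx
      rcases hr : mySplit x ([] : List Char) rest with _ | ⟨q, qs⟩
      · exact absurd hr (mySplit_ne_nil x [] rest)
      · simp only [mySplit, eq_self_iff_true, if_true, hr]
        rw [PySem.Chars.join_cons_cons, ← hr, ih []]
        simp
    · simp only [mySplit, if_neg hx]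
      rw [ih (pre ++ [x])]
      simp

theorem mySplit_no_sep (c : Char) (pre a) (ha : c ∉ a) : mySplit c pre a = [pre ++ a] := by
  induction a generalizing pre with
  | nil => simp [mySplit]
  | cons x rest ih =>
    simp only [List.mem_cons, not_or] at ha
    simp only [mySplit, if_neg (fun h : x = c => ha.1 h.symm)]
    rw [ih (pre ++ [x]) ha.2]
    simp

theorem mySplit_append_sep (c : Char) (pre a t) (ha : c ∉ a) :
    mySplit c pre (a ++ c :: t) = (pre ++ a) :: mySplit c [] t := by
  induction a generalizing pre with
  | nil => simp [mySplit]
  | cons x rest ih =>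
    simp only [List.mem_cons, not_or] at ha
    simp only [List.cons_append, mySplit, if_neg (fun h : x = c => ha.1 h.symm)]
    rw [ih (pre ++ [x]) ha.2]
    simp

theorem mySplit_join (c : Char) (parts : List (List Char))
    (h : ∀ p ∈ parts, c ∉ p) (hne : parts ≠ []) :
    mySplit c [] (PySem.Chars.join [c] parts) = parts := by
  induction parts with
  | nil => exact absurd rfl hne
  | cons p ps ih =>
    rcases ps with _ | ⟨q, qs⟩
    · rw [PySem.Chars.join_singleton]
      exact mySplit_no_sep c [] p (h p (by simp))
    · rw [PySem.Chars.join_cons_cons]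
      have heq : p ++ [c] ++ PySem.Chars.join [c] (q :: qs) =
          p ++ c :: PySem.Chars.join [c] (q :: qs) := by simp
      rw [heq, mySplit_append_sep c [] p _ (h p (by simp))]
      rw [ih (fun x hx => h x (by simp [hx])) (by simp)]
      simp

theorem two_le_mySplit_length (c : Char) (pre l) (hc : c ∈ l) :
    2 ≤ (mySplit c pre l).length := by
  induction l generalizing pre with
  | nil => simp at hc
  | cons x rest ih =>
    by_cases hx : x = c
    · subst hx
      have hne := mySplit_ne_nil x ([] : List Char) rest
      rcases hr : mySplit x ([] : List Char) rest with _ | ⟨q, qs⟩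
      · exact absurd hr hne
      · simp [mySplit, hr]
    · simp only [List.mem_cons] at hc
      rcases hc with hc | hc
      · exact absurd hc.symm hx
      · simpa [mySplit, hx] using ih (pre ++ [x]) hc

theorem foldl_underscore (tail : List (List Char)) (s1 : List Char) :
    tail.foldl (fun acc item => acc ++ '_' :: item) s1 = PySem.Chars.join ['_'] (s1 :: tail) := by
  induction tail generalizing s1 with
  | nil => simp [PySem.Chars.join, List.intercalate]
  | cons t ts ih =>
    simp only [List.foldl_cons]
    rw [ih (s1 ++ '_' :: t), PySem.Chars.join_cons_cons]
    rcases ts with _ | ⟨u, us⟩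
    · simp [PySem.Chars.join_singleton]
    · rw [PySem.Chars.join_cons_cons, PySem.Chars.join_cons_cons]
      simp

theorem ruleOf_cons_succ (p : List Char) (ps : List (List Char)) (j : Nat) :
    ruleOf (p :: ps) (j + 1) = ruleOf ps j := by
  simp [ruleOf]

theorem rulesOf_cons (p : List Char) (ps : List (List Char)) (hps : ps ≠ []) :
    rulesOf (p :: ps) = rulesOf ps ++ [ruleOf (p :: ps) 0] := by
  rcases ps with _ | ⟨q, qs⟩
  · exact absurd rfl hps
  · have hmap : (List.range qs.length).map (fun k => ruleOf (p :: q :: qs) (k + 1)) =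
        (List.range qs.length).map (ruleOf (q :: qs)) :=
      List.map_congr_left (fun k _ => ruleOf_cons_succ p (q :: qs) k)
    simp only [rulesOf, List.length_cons, Nat.add_sub_cancel, List.range_succ_eq_map,
      List.map_cons, List.map_map, List.reverse_cons]
    rw [show (ruleOf (p :: q :: qs) ∘ Nat.succ) = (fun k => ruleOf (p :: q :: qs) (k + 1)) from rfl,
      hmap]

theorem go_base (fuel : Nat) (s : List Char) (lr : List (List Char))
    (h2 : (PySem.Chars.splitOn s ['_']).length = 2) :
    sub_r_go fuel s lr = lr ++ rulesOf (PySem.Chars.splitOn s ['_']) := by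
  rcases hp : PySem.Chars.splitOn s ['_'] with _ | ⟨a, _ | ⟨b, _ | ⟨x, xs⟩⟩⟩ <;>
    rw [hp] at h2 <;> try simp at h2
  have hs : PySem.Chars.join ['_'] [a, b] = s := by
    rw [← hp, splitOn_eq_mySplit, join_mySplit]; simp
  conv_lhs => rw [sub_r_go.eq_def]
  simp only [hp]
  rw [if_pos (by simp)]
  rw [← hs]
  simp [rulesOf, ruleOf, List.range_one, PySem.Chars.join_cons_cons, PySem.Chars.join_singleton]

theorem go_spec (fuel : Nat) (s : List Char) (lr : List (List Char))
    (h2 : 2 ≤ (PySem.Chars.splitOn s ['_']).length)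
    (hf : (PySem.Chars.splitOn s ['_']).length ≤ fuel + 2) :
    sub_r_go fuel s lr = lr ++ rulesOf (PySem.Chars.splitOn s ['_']) := by
  induction fuel generalizing s lr with
  | zero => exact go_base 0 s lr (by omega)
  | succ f ih =>
    by_cases h2e : (PySem.Chars.splitOn s ['_']).length = 2
    · exact go_base (f + 1) s lr h2e
    · rcases hp : PySem.Chars.splitOn s ['_'] with _ | ⟨s0, _ | ⟨s1, _ | ⟨t0, ts⟩⟩⟩ <;>
        rw [hp] at h2 h2e <;> try simp at h2 h2e
      have hnomem : ∀ p ∈ s0 :: s1 :: t0 :: ts, '_' ∉ p := by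
        intro p hpmem
        refine not_mem_of_mem_mySplit '_' [] s p ?_ (by simp)
        rw [← splitOn_eq_mySplit, hp]; exact hpmem
      have hjoin : PySem.Chars.splitOn (PySem.Chars.join ['_'] (s1 :: t0 :: ts)) ['_'] =
          s1 :: t0 :: ts := by
        rw [splitOn_eq_mySplit]
        refine mySplit_join '_' _ (fun p hm => hnomem p ?_) (by simp)
        simp only [List.mem_cons] at hm ⊢
        tauto
      have hs : PySem.Chars.join ['_'] (s0 :: s1 :: t0 :: ts) = s := by
        rw [← hp, splitOn_eq_mySplit, join_mySplit]; simp
      conv_lhs => rw [sub_r_go.eq_def]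
      simp only [hp]
      show sub_r_go f ((t0 :: ts).foldl (fun acc item => acc ++ '_' :: item) s1) lr ++
          [s ++ [' ', '-', '>', ' '] ++ s0 ++
            ' ' :: (t0 :: ts).foldl (fun acc item => acc ++ '_' :: item) s1] =
        lr ++ rulesOf (s0 :: s1 :: t0 :: ts)
      rw [foldl_underscore]
      rw [ih _ lr (by rw [hjoin]; simp) (by rw [hjoin]; rw [hp] at hf; simp at hf ⊢; omega)]
      rw [hjoin, rulesOf_cons s0 (s1 :: t0 :: ts) (by simp)]
      have hr0 : ruleOf (s0 :: s1 :: t0 :: ts) 0 =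
          s ++ [' ', '-', '>', ' '] ++ s0 ++ ' ' :: PySem.Chars.join ['_'] (s1 :: t0 :: ts) := by
        simp [ruleOf, hs]
      rw [hr0]
      simp [List.append_assoc]

theorem revA (lr : List (List Char)) :
    (PySem.List.pyRange 0 (lr.length : Int)).foldl
      (fun l i => l ++ [PySem.List.pyGetD lr ((lr.length : Int) - i - 1) []]) [] = lr.reverse := by
  rw [show ((lr.length : Int)) = ((lr.length : Nat) : Int) from rfl,
    PySem.List.pyRange_zero_natCast, List.foldl_map,
    PySem.List.foldl_append_singleton_eq_map]
  simp only [List.nil_append]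
  apply List.ext_getElem (by simp)
  intro i h1 h2
  simp only [List.getElem_map, List.getElem_range, List.getElem_reverse]
  have hlen : i < lr.length := by simpa using h1
  have hc : ((lr.length : Int) - (i : Nat) - 1) = ((lr.length - 1 - i : Nat) : Int) := by
    push_cast; omega
  rw [hc, PySem.List.pyGetD_natCast, List.getD_eq_getElem _ _ (by omega)]

theorem goMax_zero (f : Nat) (t : List Char) (acc : List (List Char)) :
    PySem.Chars.splitOnMax.go ['_'] f 0 t [] acc = (t :: acc).reverse := by
  cases f with
  | zero => rw [PySem.Chars.splitOnMax.go.eq_def]; simp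
  | succ f' =>
    cases t with
    | nil => rw [PySem.Chars.splitOnMax.go.eq_def]; simp
    | cons c rest => rw [PySem.Chars.splitOnMax.go.eq_def]; simp

theorem goMax_split (a t : List Char) (fuel : Nat) (cur : List Char)
    (acc : List (List Char)) (ha : '_' ∉ a) (hf : a.length < fuel) :
    PySem.Chars.splitOnMax.go ['_'] fuel 1 (a ++ '_' :: t) cur acc =
      acc.reverse ++ [cur.reverse ++ a, t] := by
  induction a generalizing fuel cur acc with
  | nil =>
    cases fuel with
    | zero => omega
    | succ f =>
      rw [PySem.Chars.splitOnMax.go.eq_def]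
      simp only [List.nil_append, List.isPrefixOf, beq_self_eq_true, Bool.true_and,
        if_pos, if_neg (by omega : ¬ (1 : Nat) = 0)]
      rw [show (1 : Nat) - 1 = 0 from rfl, goMax_zero]
      simp
  | cons x a' ih =>
    cases fuel with
    | zero => simp at hf
    | succ f =>
      simp only [List.mem_cons, not_or] at ha
      rw [PySem.Chars.splitOnMax.go.eq_def]
      have hbx : ('_' == x) = false := by simp [ha.1]
      simp only [List.cons_append, List.isPrefixOf, hbx, Bool.false_and,
        Bool.false_eq_true, if_false, if_neg (by omega : ¬ (1 : Nat) = 0)]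
      rw [ih f (x :: cur) acc ha.2 (by simp at hf; omega)]
      simp

theorem splitOnMax_eq (a t : List Char) (ha : '_' ∉ a) :
    PySem.Chars.splitOnMax (a ++ '_' :: t) ['_'] 1 = [a, t] := by
  unfold PySem.Chars.splitOnMax
  rw [if_neg (by omega : ¬ (1 : Int) < 0)]
  rw [show ((1 : Int)).toNat = 1 from rfl,
    goMax_split a t _ [] [] ha
      (by simp only [List.length_append, List.length_cons]; omega)]
  simp

theorem isIn_singleton_of_mem (c : Char) (s : List Char) (h : c ∈ s) :
    PySem.Chars.isIn [c] s = true := by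
  rw [PySem.Chars.isIn_iff_infix]
  obtain ⟨p, q, rfl⟩ := List.append_of_mem h |>.imp (fun p hp => hp.imp (fun q hq => hq))
  exact ⟨p, q, by simp⟩

theorem isIn_singleton_of_not_mem (c : Char) (s : List Char) (h : c ∉ s) :
    PySem.Chars.isIn [c] s = false := by
  rw [PySem.Chars.isIn_eq_false_iff]
  intro hinf
  exact h (hinf.subset (by simp))

theorem alt_go_spec (parts : List (List Char)) (fuel : Nat) (rules : List (List Char))
    (h2 : 2 ≤ parts.length) (hnm : ∀ p ∈ parts, '_' ∉ p)
    (hf : (PySem.Chars.join ['_'] parts).length < fuel) :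
    sub_r_alt_go fuel (PySem.Chars.join ['_'] parts) rules =
      rules ++ (List.range (parts.length - 1)).map (ruleOf parts) := by
  induction parts generalizing fuel rules with
  | nil => simp at h2
  | cons p ps ih =>
    rcases ps with _ | ⟨q, qs⟩
    · simp at h2
    · have hjoin : PySem.Chars.join ['_'] (p :: q :: qs) =
          p ++ '_' :: PySem.Chars.join ['_'] (q :: qs) := by
        rw [PySem.Chars.join_cons_cons]; simp
      cases fuel with
      | zero => omega
      | succ f =>
        rw [sub_r_alt_go, hjoin, splitOnMax_eq p _ (hnm p (by simp))]
        dsimp only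
        rcases qs with _ | ⟨r0, rs⟩
        · rw [if_neg (by
            rw [PySem.Chars.join_singleton,
              isIn_singleton_of_not_mem '_' q (hnm q (by simp))]
            simp)]
          simp [List.range_one, ruleOf, PySem.Chars.join_cons_cons,
            PySem.Chars.join_singleton]
        · rw [if_pos (isIn_singleton_of_mem '_' _ (by
            rw [PySem.Chars.join_cons_cons]; simp))]
          rw [ih f _ (by simp) (fun x hx => hnm x (by simp at hx ⊢; tauto)) (by
            rw [hjoin] at hf; simp at hf ⊢; omega)]
          have hmap : (List.range (q :: r0 :: rs).length).map (ruleOf (p :: q :: r0 :: rs)) =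
              ruleOf (p :: q :: r0 :: rs) 0 ::
                (List.range ((r0 :: rs).length)).map (ruleOf (q :: r0 :: rs)) := by
            rw [show (q :: r0 :: rs).length = (r0 :: rs).length + 1 from rfl,
              List.range_succ_eq_map, List.map_cons, List.map_map]
            congr 1
          simp only [List.length_cons, Nat.add_sub_cancel] at hmap ⊢
          rw [hmap]
          simp [ruleOf, PySem.Chars.join_cons_cons, PySem.Chars.join_singleton]

theorem alt_eval (s : String) (lr : List String)
    (h2 : 2 ≤ (PySem.Chars.splitOn s.toList ['_']).length) :
    sub_r_alt s lr = (((lr.map String.toList) ++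
      rulesOf (PySem.Chars.splitOn s.toList ['_'])).reverse).map String.mk := by
  have hnm : ∀ p ∈ PySem.Chars.splitOn s.toList ['_'], '_' ∉ p := by
    intro p hp
    rw [splitOn_eq_mySplit] at hp
    exact not_mem_of_mem_mySplit '_' [] s.toList p hp (by simp)
  have hs : PySem.Chars.join ['_'] (PySem.Chars.splitOn s.toList ['_']) = s.toList := by
    rw [splitOn_eq_mySplit, join_mySplit]; simp
  have hgo := alt_go_spec (PySem.Chars.splitOn s.toList ['_']) (s.toList.length + 1) []
    h2 hnm (by rw [hs]; omega)
  rw [hs] at hgo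
  simp only [sub_r_alt]
  rw [hgo, PySem.List.slice?_none_none_neg_one]
  simp [rulesOf]

-- ===== VERDICT (by name: the statement is the Claim_ definition above) =====
theorem sub_r_spec : Claim_equal_sub_r := by
  intro s lr _ hpre
  unfold Spec_sub_r
  have hmem : '_' ∈ s.toList := by
    unfold Pre_sub_r at hpre
    have hinf := (PySem.Str.isIn_iff_infix "_" s).mp hpre
    exact hinf.subset (by simp)
  have h2 : 2 ≤ (PySem.Chars.splitOn s.toList ['_']).length := by
    rw [splitOn_eq_mySplit]; exact two_le_mySplit_length '_' [] s.toList hmem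
  simp only [sub_r]
  rw [go_spec _ _ _ h2 (by omega), revA, alt_eval _ _ h2]
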